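-- pv_equiv track=rewrite | github.com/animaggma/pythonlab | lab2.py | separate_and_count
-- ===== SOURCE A (Python) =====
-- def separate_and_count(text):
--     lower_case = []
--     upper_case = []
--     count = 0
--
--     for char in text:
--         count += 1
--         if char.islower():
--             lower_case.append(char)
--         elif char.isupper():
--             upper_case.append(char)
--
--     result = ''.join(lower_case) + ''.join(upper_case)
--
--     return result, count
-- ===== SOURCE B (Python) =====
-- def separate_and_count(text):
--     letters = [c for c in text if c.islower() or c.isupper()]
--     letters.sort(key=lambda c: 1 if c.isupper() else 0)
--     return ''.join(letters), len(text)
-- ===== Notes on version B (the rewrite author's own statement) =====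
-- stated objective: alternative
-- what changed: Instead of A's fused loop that counts and appends into two accumulator lists, B filters the letters once and then STABLY SORTS them by a case key (lower=0, upper=1), letting sort stability produce the lower-then-upper partition; the count is len(text).
import Mathlib
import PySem

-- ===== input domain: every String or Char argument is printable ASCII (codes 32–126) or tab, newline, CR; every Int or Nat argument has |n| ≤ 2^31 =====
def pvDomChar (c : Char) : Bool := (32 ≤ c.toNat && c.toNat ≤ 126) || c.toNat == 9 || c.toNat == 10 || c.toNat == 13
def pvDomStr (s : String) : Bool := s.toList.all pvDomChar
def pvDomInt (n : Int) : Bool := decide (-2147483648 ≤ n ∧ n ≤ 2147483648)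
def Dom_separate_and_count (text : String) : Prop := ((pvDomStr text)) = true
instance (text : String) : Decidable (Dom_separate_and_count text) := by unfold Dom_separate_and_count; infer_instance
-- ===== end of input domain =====

-- B replaces A's fused count-and-partition loop by a one-pass letter filter followed by a
-- STABLE SORT on a case key (lower=0, upper=1); stability yields the same partition (objective: alternative).

-- ===== PORT A =====
def separate_and_count (text : String) : String × Int :=
  let st := text.toList.foldl
    (fun (st : List Char × List Char × Int) c =>
      let cnt := st.2.2 + 1
      if PySem.Chars.islower c then (st.1 ++ [c], st.2.1, cnt)
      else if PySem.Chars.isupper c then (st.1, st.2.1 ++ [c], cnt)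
      else (st.1, st.2.1, cnt))
    ([], [], 0)
  (String.ofList (st.1 ++ st.2.1), st.2.2)

-- ===== PORT B =====
def pvCaseKey (c : Char) : Int := if PySem.Chars.isupper c then 1 else 0

def separate_and_count_alt (text : String) : String × Int :=
  let letters := text.toList.filter (fun c => PySem.Chars.islower c || PySem.Chars.isupper c)
  let sorted := PySem.List.sorted letters pvCaseKey false
  (String.ofList sorted, PySem.Str.len text)

-- ===== PRECONDITION & SPEC =====
def Spec_separate_and_count (text : String) (out : String × Int) : Prop := out = separate_and_count_alt text
instance (text : String) (out : String × Int) : Decidable (Spec_separate_and_count text out) := by unfold Spec_separate_and_count; infer_instance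

-- ===== CLAIM (what is proved, stated in full; the proofs are below) =====
def Claim_equal_separate_and_count : Prop := ∀ (text : String), Dom_separate_and_count text → Spec_separate_and_count text (separate_and_count text)

-- ===== LEMMAS AND PROOFS =====

theorem islower_not_isupper (c : Char) (h : PySem.Chars.islower c = true) :
    PySem.Chars.isupper c = false := by
  simp [PySem.Chars.islower, PySem.Chars.isupper, Char.le_def, UInt32.le_iff_toNat_le] at *
  intro h2; omega

-- A's fold computes (lowers, uppers, count) by appending.
theorem separate_foldl_inv (l lo up : List Char) (cnt : Int) :
    l.foldl
      (fun (st : List Char × List Char × Int) c =>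
        let cnt := st.2.2 + 1
        if PySem.Chars.islower c then (st.1 ++ [c], st.2.1, cnt)
        else if PySem.Chars.isupper c then (st.1, st.2.1 ++ [c], cnt)
        else (st.1, st.2.1, cnt))
      (lo, up, cnt) =
    (lo ++ l.filter PySem.Chars.islower, up ++ l.filter PySem.Chars.isupper, cnt + l.length) := by
  induction l generalizing lo up cnt with
  | nil => simp
  | cons c t ih =>
    simp only [List.foldl_cons, List.filter_cons, List.length_cons]
    split_ifs with hl hu <;> rw [ih] <;> simp [Prod.ext_iff] <;>
      first
        | omega
        | exact absurd ‹PySem.Chars.isupper c = true›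
            (by simp [islower_not_isupper c ‹PySem.Chars.islower c = true›])

-- Inserting a lowercase letter into a lowers-then-uppers list lands at the end of the lowers.
theorem insertBy_lower (c : Char) (hc : PySem.Chars.islower c = true)
    (lo up : List Char)
    (hlo : ∀ x ∈ lo, PySem.Chars.islower x = true)
    (hup : ∀ x ∈ up, PySem.Chars.isupper x = true) :
    PySem.List.insertBy (fun a b => decide (pvCaseKey a < pvCaseKey b)) c (lo ++ up) =
      lo ++ c :: up := by
  induction lo with
  | nil =>
    cases up with
    | nil => rfl
    | cons y ys =>
      have hy := hup y (by simp)
      have hcond : (decide (pvCaseKey c < pvCaseKey y)) = true := by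
        simp [pvCaseKey, hy, islower_not_isupper c hc]
      simp [PySem.List.insertBy, hcond]
  | cons a t ih =>
    have ha := hlo a (by simp)
    have ht : ∀ x ∈ t, PySem.Chars.islower x = true := fun x hx => hlo x (by simp [hx])
    have hcond : (decide (pvCaseKey c < pvCaseKey a)) = false := by
      simp [pvCaseKey, islower_not_isupper a ha, islower_not_isupper c hc]
    simp [PySem.List.insertBy, hcond, ih ht]

-- Inserting an uppercase letter (maximal key) lands at the very end.
theorem insertBy_upper (c : Char) (hc : PySem.Chars.isupper c = true)
    (zs : List Char) :
    PySem.List.insertBy (fun a b => decide (pvCaseKey a < pvCaseKey b)) c zs = zs ++ [c] := by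
  induction zs with
  | nil => rfl
  | cons y ys ih =>
    have hk : ¬ pvCaseKey c < pvCaseKey y := by
      simp [pvCaseKey, hc]; split <;> omega
    simp [PySem.List.insertBy, hk, ih]

-- The insertion-sort fold over a pure-letter list builds lowers ++ uppers.
theorem sort_fold_partition (l : List Char)
    (hl : ∀ x ∈ l, PySem.Chars.islower x = true ∨ PySem.Chars.isupper x = true)
    (lo up : List Char)
    (hlo : ∀ x ∈ lo, PySem.Chars.islower x = true)
    (hup : ∀ x ∈ up, PySem.Chars.isupper x = true) :
    l.foldl (fun acc x => PySem.List.insertBy (fun a b => decide (pvCaseKey a < pvCaseKey b)) x acc)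
      (lo ++ up) =
    (lo ++ l.filter PySem.Chars.islower) ++ (up ++ l.filter PySem.Chars.isupper) := by
  induction l generalizing lo up with
  | nil => simp
  | cons c t ih =>
    have ht : ∀ x ∈ t, PySem.Chars.islower x = true ∨ PySem.Chars.isupper x = true :=
      fun x hx => hl x (by simp [hx])
    rcases hl c (by simp) with hc | hc
    · have hcu := islower_not_isupper c hc
      simp only [List.foldl_cons, insertBy_lower c hc lo up hlo hup, List.filter_cons, hc, hcu]
      have : lo ++ c :: up = (lo ++ [c]) ++ up := by simp
      rw [this, ih ht (lo ++ [c]) up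
        (by intro x hx; rcases List.mem_append.1 hx with h | h
            · exact hlo x h
            · simp at h; subst h; exact hc) hup]
      simp
    · have hcl : PySem.Chars.islower c = false := by
        by_contra h
        simp at h
        exact absurd hc (by simp [islower_not_isupper c h])
      simp only [List.foldl_cons, List.filter_cons, hc, hcl]
      have : (lo ++ up) ++ [c] = lo ++ (up ++ [c]) := by simp
      rw [insertBy_upper c hc, this, ih ht lo (up ++ [c]) hlo
        (by intro x hx; rcases List.mem_append.1 hx with h | h
            · exact hup x h
            · simp at h; subst h; exact hc)]
      simp

-- Stable sort by the case key of the letters of tl = lowers of tl ++ uppers of tl.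
theorem sorted_letters_eq (tl : List Char) :
    PySem.List.sorted (tl.filter (fun c => PySem.Chars.islower c || PySem.Chars.isupper c))
        pvCaseKey false =
      tl.filter PySem.Chars.islower ++ tl.filter PySem.Chars.isupper := by
  rw [PySem.List.sorted_eq_foldl_insertBy]
  have h := sort_fold_partition
    (tl.filter (fun c => PySem.Chars.islower c || PySem.Chars.isupper c))
    (by intro x hx; have := List.of_mem_filter hx; simpa using this)
    [] [] (by simp) (by simp)
  simp only [List.nil_append] at h
  rw [h]
  congr 1
  · rw [List.filter_filter]
    apply List.filter_congr
    intro x _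
    cases h : PySem.Chars.islower x
    · simp [h]
    · simp
  · rw [List.filter_filter]
    apply List.filter_congr
    intro x _
    cases h : PySem.Chars.isupper x
    · simp [h]
    · simp

-- ===== VERDICT (by name: the statement is the Claim_ definition above) =====
theorem separate_and_count_spec : Claim_equal_separate_and_count := by
  intro text _
  show _ = _
  simp [separate_and_count, separate_and_count_alt, separate_foldl_inv, sorted_letters_eq,
    PySem.Str.len_eq]
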